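-- pv_equiv track=rewrite | github.com/autodistill/autodistill-seggpt | autodistill_seggpt/find_best_examples.py | combo_hash_to_choices
-- ===== SOURCE A (Python) =====
-- from typing import List, Type, Union, Callable, Tuple
--
-- def combo_hash_to_choices(
--     fact: int, candidates: List[any], num_choices: int
-- ) -> List[any]:
--     assert len(candidates) >= num_choices, "Not enough candidates to choose from."
--
--     chosen = []
--     curr_fact = fact
--     remaining_candidates = [*candidates]
--     for i in range(num_choices, 0, -1):
--         which_remaining_candidate = curr_fact % i
--         chosen.append(remaining_candidates.pop(which_remaining_candidate))
--         curr_fact = curr_fact // i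
--     return chosen
-- ===== SOURCE B (Python) =====
-- def _build_tree(candidates, lo, hi):
--     # balanced segment tree over candidates[lo:hi]; node = [alive_count, left, right], leaf = [alive_count, value]
--     if hi - lo == 1:
--         return [1, candidates[lo]]
--     mid = (lo + hi) // 2
--     left = _build_tree(candidates, lo, mid)
--     right = _build_tree(candidates, mid, hi)
--     return [left[0] + right[0], left, right]
--
--
-- def _pick_tree(t, r):
--     # remove and return the r-th (0-based) still-alive element of the subtree t
--     if len(t) == 2:
--         t[0] = 0
--         return t[1]
--     left = t[1]
--     if r < left[0]:
--         v = _pick_tree(left, r)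
--     else:
--         v = _pick_tree(t[2], r - left[0])
--     t[0] -= 1
--     return v
--
--
-- def combo_hash_to_choices(fact, candidates, num_choices):
--     assert len(candidates) >= num_choices, "Not enough candidates to choose from."
--
--     tree = _build_tree(candidates, 0, len(candidates)) if candidates else None
--     chosen = []
--     f = fact
--     for i in range(num_choices, 0, -1):
--         chosen.append(_pick_tree(tree, f % i))
--         f //= i
--     return chosen
-- ===== Notes on version B (the rewrite author's own statement) =====
-- stated objective: faster
-- what changed: B replaces A's pop-from-a-shrinking-list (each pop shifts the tail) by a balanced order-statistics segment tree over the candidates: the r-th remaining element is removed and returned by an O(log n) descent on alive-counts.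
import Mathlib
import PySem

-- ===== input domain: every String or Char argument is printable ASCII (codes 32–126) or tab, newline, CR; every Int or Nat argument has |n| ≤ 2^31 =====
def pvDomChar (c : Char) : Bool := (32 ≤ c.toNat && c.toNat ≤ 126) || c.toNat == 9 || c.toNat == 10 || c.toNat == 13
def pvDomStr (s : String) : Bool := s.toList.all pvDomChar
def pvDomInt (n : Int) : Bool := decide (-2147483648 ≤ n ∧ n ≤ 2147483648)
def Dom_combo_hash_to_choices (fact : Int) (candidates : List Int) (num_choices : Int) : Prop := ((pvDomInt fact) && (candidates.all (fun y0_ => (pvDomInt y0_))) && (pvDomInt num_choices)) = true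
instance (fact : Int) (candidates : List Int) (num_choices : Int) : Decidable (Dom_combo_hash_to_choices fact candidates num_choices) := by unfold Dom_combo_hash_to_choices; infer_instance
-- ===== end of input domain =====

-- B replaces A's pop-from-a-shrinking-list by an order-statistics segment tree over the
-- candidates (remove-and-return the r-th remaining element in O(log n)).

-- ===== PORT A =====
-- one iteration of A's for-loop: state (chosen, curr_fact, remaining_candidates)
def comboA_step (st : List Int × Int × List Int) (i : Int) : List Int × Int × List Int :=
  let r := PySem.Int.mod st.2.1 i
  match PySem.List.pop? st.2.2 r with
  | some (x, rem') => (st.1 ++ [x], PySem.Int.floordiv st.2.1 i, rem')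
  | none => (st.1, PySem.Int.floordiv st.2.1 i, st.2.2)  -- Python raises IndexError here; outside Pre_

def combo_hash_to_choices (fact : Int) (candidates : List Int) (num_choices : Int) : List Int :=
  ((PySem.List.pyRange num_choices 0 (-1)).foldl comboA_step ([], fact, candidates)).1

-- ===== PORT B =====
-- B's tree: leaf (alive-count ≤ 1, value) / node (alive-count, left, right)
inductive PkTree where
  | leaf : Nat → Int → PkTree
  | node : Nat → PkTree → PkTree → PkTree
deriving DecidableEq, Repr

def PkTree.count : PkTree → Nat
  | .leaf c _ => c
  | .node c _ _ => c

-- _build_tree(candidates, lo, hi); the `hi - lo ≤ 1` guard only totalizes the recursion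
-- (Python never calls it with hi - lo < 1), pyGetD totalizes candidates[lo]
def buildTree (cs : List Int) (lo hi : Int) : PkTree :=
  if _h : hi - lo ≤ 1 then .leaf 1 (PySem.List.pyGetD cs lo 0)
  else
    let mid := PySem.Int.floordiv (lo + hi) 2
    let l := buildTree cs lo mid
    let r := buildTree cs mid hi
    .node (l.count + r.count) l r
termination_by (hi - lo).toNat
decreasing_by
  all_goals
    have h1 : lo + 1 ≤ PySem.Int.floordiv (lo + hi) 2 :=
      (PySem.Int.le_floordiv_iff_mul_le (a := lo + hi) (b := 2) (q := lo + 1) (by omega)).mpr (by omega)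
    have h2 : PySem.Int.floordiv (lo + hi) 2 < hi :=
      (PySem.Int.floordiv_lt_iff_lt_mul (a := lo + hi) (b := 2) (q := hi) (by omega)).mpr (by omega)
    omega

-- _pick_tree(t, r): remove and return the r-th still-alive element
-- (Nat counts: the `- 1` is Nat truncation, reachable only outside Pre_)
def pickTree : PkTree → Int → Int × PkTree
  | .leaf _ v, _ => (v, .leaf 0 v)
  | .node c l r, i =>
      if i < (l.count : Int) then
        let p := pickTree l i
        (p.1, .node (c - 1) p.2 r)
      else
        let p := pickTree r (i - (l.count : Int))
        (p.1, .node (c - 1) l p.2)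

-- one iteration of B's for-loop: state (chosen, f, tree); tree = none is Python's
-- `tree = None` (candidates empty; the loop body never runs on it inside Pre_)
def comboB_step (st : List Int × Int × Option PkTree) (i : Int) : List Int × Int × Option PkTree :=
  match st.2.2 with
  | some t =>
      let p := pickTree t (PySem.Int.mod st.2.1 i)
      (st.1 ++ [p.1], PySem.Int.floordiv st.2.1 i, some p.2)
  | none => (st.1, PySem.Int.floordiv st.2.1 i, none)

def combo_hash_to_choices_alt (fact : Int) (candidates : List Int) (num_choices : Int) : List Int :=
  let tree := if candidates.isEmpty then none
              else some (buildTree candidates 0 (candidates.length : Int))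
  ((PySem.List.pyRange num_choices 0 (-1)).foldl comboB_step ([], fact, tree)).1

-- ===== PRECONDITION & SPEC =====
-- Pre_ excludes exactly the inputs where A's assert fails (AssertionError): num_choices > len(candidates).
def Pre_combo_hash_to_choices (fact : Int) (candidates : List Int) (num_choices : Int) : Prop :=
  num_choices ≤ (candidates.length : Int)
instance (fact : Int) (candidates : List Int) (num_choices : Int) : Decidable (Pre_combo_hash_to_choices fact candidates num_choices) := by unfold Pre_combo_hash_to_choices; infer_instance

def pvWitness_combo_hash_to_choices : Int × List Int × Int := (5, [10, 20, 30], 2)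

def Spec_combo_hash_to_choices (fact : Int) (candidates : List Int) (num_choices : Int) (out : List Int) : Prop := out = combo_hash_to_choices_alt fact candidates num_choices
instance (fact : Int) (candidates : List Int) (num_choices : Int) (out : List Int) : Decidable (Spec_combo_hash_to_choices fact candidates num_choices out) := by unfold Spec_combo_hash_to_choices; infer_instance

-- ===== CLAIM (what is proved, stated in full; the proofs are below) =====
def Claim_equal_combo_hash_to_choices : Prop := ∀ (fact : Int) (candidates : List Int) (num_choices : Int), Dom_combo_hash_to_choices fact candidates num_choices → Pre_combo_hash_to_choices fact candidates num_choices → Spec_combo_hash_to_choices fact candidates num_choices (combo_hash_to_choices fact candidates num_choices)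

-- ===== LEMMAS AND PROOFS =====

-- the still-alive elements of a tree, in order: this is A's remaining_candidates
def toRem : PkTree → List Int
  | .leaf c v => if c = 1 then [v] else []
  | .node _ l r => toRem l ++ toRem r

-- the stored alive-counts are correct
def wfT : PkTree → Prop
  | .leaf c _ => c ≤ 1
  | .node c l r => c = (toRem l).length + (toRem r).length ∧ wfT l ∧ wfT r

lemma count_eq_of_wf (t : PkTree) (h : wfT t) : t.count = (toRem t).length := by
  cases t with
  | leaf c v =>
    unfold wfT at h
    interval_cases c <;> simp [PkTree.count, toRem]
  | node c l r =>
    unfold wfT at h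
    simp [PkTree.count, toRem, h.1]

lemma pickTree_spec (t : PkTree) : ∀ (i : Int), wfT t → 0 ≤ i → i.toNat < (toRem t).length →
    (toRem t)[i.toNat]? = some (pickTree t i).1
    ∧ toRem (pickTree t i).2 = (toRem t).eraseIdx i.toNat
    ∧ wfT (pickTree t i).2 := by
  induction t with
  | leaf c v =>
    intro i hw _ hlt
    unfold wfT at hw
    have hc : c = 1 := by
      by_contra h
      simp [toRem, if_neg h] at hlt
    subst hc
    simp [toRem] at hlt
    have : i.toNat = 0 := by omega
    simp [pickTree, toRem, wfT, this]
  | node c l r ihl ihr =>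
    intro i hw hi hlt
    obtain ⟨hc, hwl, hwr⟩ := hw
    have hlc : l.count = (toRem l).length := count_eq_of_wf l hwl
    simp only [toRem, List.length_append] at hlt
    by_cases hbr : i < (l.count : Int)
    · have hilt : i.toNat < (toRem l).length := by omega
      obtain ⟨h1, h2, h3⟩ := ihl i hwl hi hilt
      refine ⟨?_, ?_, ?_⟩
      · simp only [pickTree, if_pos hbr, toRem]
        rw [List.getElem?_append_left hilt]; exact h1
      · simp only [pickTree, if_pos hbr, toRem]
        rw [h2, List.eraseIdx_append_of_lt_length hilt]
      · simp only [pickTree, if_pos hbr]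
        refine ⟨?_, h3, hwr⟩
        rw [h2, List.length_eraseIdx_of_lt hilt]
        omega
    · have hge : (toRem l).length ≤ i.toNat := by omega
      have hik : (i - (l.count : Int)).toNat = i.toNat - (toRem l).length := by omega
      have hilt : (i - (l.count : Int)).toNat < (toRem r).length := by omega
      obtain ⟨h1, h2, h3⟩ := ihr (i - (l.count : Int)) hwr (by omega) hilt
      refine ⟨?_, ?_, ?_⟩
      · simp only [pickTree, if_neg hbr, toRem]
        rw [List.getElem?_append_right hge, ← hik]; exact h1
      · simp only [pickTree, if_neg hbr, toRem]
        rw [h2, hik, List.eraseIdx_append_of_length_le hge]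
      · simp only [pickTree, if_neg hbr]
        refine ⟨?_, hwl, h3⟩
        rw [h2, List.length_eraseIdx_of_lt hilt]
        omega

lemma buildTree_spec (cs : List Int) : ∀ (n : Nat) (lo hi : Int), hi - lo ≤ (n : Int) →
    0 ≤ lo → lo < hi → hi ≤ (cs.length : Int) →
    wfT (buildTree cs lo hi)
    ∧ toRem (buildTree cs lo hi) = (cs.drop lo.toNat).take (hi - lo).toNat := by
  intro n
  induction n with
  | zero => intro lo hi h1 _ h3 _; omega
  | succ n ih =>
    intro lo hi hn hlo hlohi hhi
    by_cases hb : hi - lo ≤ 1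
    · have hhi1 : hi = lo + 1 := by omega
      have hlt : lo.toNat < cs.length := by omega
      rw [buildTree, dif_pos hb]
      have hget : PySem.List.pyGetD cs lo 0 = cs[lo.toNat] := by
        rw [PySem.List.pyGetD_of_nonneg cs (0 : Int) hlo]
        simp [List.getD_eq_getElem?_getD, List.getElem?_eq_getElem hlt]
      constructor
      · simp [wfT]
      · have htake : List.take 1 (List.drop lo.toNat cs) = [cs[lo.toNat]] := by
          rw [List.drop_eq_getElem_cons hlt, List.take_succ_cons, List.take_zero]
        rw [show (hi - lo).toNat = 1 by omega, toRem, if_pos rfl, hget, htake]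
    · rw [buildTree, dif_neg hb]
      set mid := PySem.Int.floordiv (lo + hi) 2 with hmid
      have hmlo : lo + 1 ≤ mid := by
        have := (PySem.Int.le_floordiv_iff_mul_le (a := lo + hi) (b := 2) (q := lo + 1) (by omega)).mpr (by omega)
        omega
      have hmhi : mid < hi := by
        exact (PySem.Int.floordiv_lt_iff_lt_mul (a := lo + hi) (b := 2) (q := hi) (by omega)).mpr (by omega)
      obtain ⟨hwl, hrl⟩ := ih lo mid (by omega) hlo (by omega) (by omega)
      obtain ⟨hwr, hrr⟩ := ih mid hi (by omega) (by omega) (by omega) hhi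
      have hjoin : toRem (buildTree cs lo mid) ++ toRem (buildTree cs mid hi)
          = (cs.drop lo.toNat).take (hi - lo).toNat := by
        rw [hrl, hrr]
        have hdd : List.drop (mid - lo).toNat (List.drop lo.toNat cs)
            = List.drop mid.toNat cs := by
          rw [List.drop_drop]; congr 1; omega
        rw [show (hi - lo).toNat = (mid - lo).toNat + (hi - mid).toNat by omega,
          List.take_add, hdd]
      constructor
      · refine ⟨?_, hwl, hwr⟩
        rw [count_eq_of_wf _ hwl, count_eq_of_wf _ hwr]
      · simpa [toRem] using hjoin

-- the two loops stay in lockstep: remaining_candidates = toRem tree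
lemma loop_eq : ∀ (n : Nat) (i : Int), i ≤ (n : Int) →
    ∀ (chosen : List Int) (f : Int) (t : PkTree), wfT t →
    i ≤ ((toRem t).length : Int) →
    ((PySem.List.pyRange i 0 (-1)).foldl comboA_step (chosen, f, toRem t)).1
      = ((PySem.List.pyRange i 0 (-1)).foldl comboB_step (chosen, f, some t)).1 := by
  intro n
  induction n with
  | zero =>
    intro i hi chosen f t _ _
    rw [PySem.List.pyRange_neg_one_eq_nil (by omega)]
    rfl
  | succ n ih =>
    intro i hi chosen f t hw hlen
    by_cases hpos : 0 < i
    · rw [PySem.List.pyRange_neg_one_cons (by omega)]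
      simp only [List.foldl_cons]
      set r := PySem.Int.mod f i with hr
      have hr0 : 0 ≤ r := PySem.Int.mod_nonneg f hpos
      have hri : r < i := PySem.Int.mod_lt f hpos
      have hrl : r.toNat < (toRem t).length := by omega
      obtain ⟨h1, h2, h3⟩ := pickTree_spec t r hw hr0 hrl
      have hpop : PySem.List.pop? (toRem t) (PySem.Int.mod f i)
          = some ((toRem t)[r.toNat], (toRem t).eraseIdx r.toNat) := by
        rw [show PySem.Int.mod f i = ((r.toNat : Nat) : Int) by omega]
        exact PySem.List.pop?_natCast (toRem t) r.toNat hrl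
      have hval : (pickTree t r).1 = (toRem t)[r.toNat] := by
        rw [List.getElem?_eq_getElem hrl] at h1
        exact (Option.some_injective _ h1).symm
      have hA : comboA_step (chosen, f, toRem t) i
          = (chosen ++ [(toRem t)[r.toNat]], PySem.Int.floordiv f i,
             (toRem t).eraseIdx r.toNat) := by
        simp only [comboA_step, hpop]
      have hB : comboB_step (chosen, f, some t) i
          = (chosen ++ [(toRem t)[r.toNat]], PySem.Int.floordiv f i,
             some (pickTree t r).2) := by
        simp only [comboB_step, ← hr, hval]
      rw [hA, hB, ← h2]
      apply ih (i - 1) (by omega) _ _ _ h3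
      rw [h2]
      have := List.length_eraseIdx_of_lt hrl
      omega
    · rw [PySem.List.pyRange_neg_one_eq_nil (by omega)]
      rfl

-- ===== VERDICT (by name: the statement is the Claim_ definition above) =====
theorem combo_hash_to_choices_spec : Claim_equal_combo_hash_to_choices := by
  intro fact candidates num_choices _ hpre
  unfold Spec_combo_hash_to_choices combo_hash_to_choices combo_hash_to_choices_alt
  by_cases hcs : candidates.isEmpty
  · rw [if_pos hcs]
    have hlen : candidates.length = 0 := by simpa [List.isEmpty_iff_length_eq_zero] using hcs
    have : num_choices ≤ 0 := by
      unfold Pre_combo_hash_to_choices at hpre; omega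
    rw [PySem.List.pyRange_neg_one_eq_nil (by omega)]
    rfl
  · rw [if_neg hcs]
    have hne : 0 < candidates.length := by
      cases candidates with
      | nil => simp at hcs
      | cons _ _ => simp
    obtain ⟨hw, hr⟩ := buildTree_spec candidates candidates.length 0 (candidates.length : Int)
      (by omega) (by omega) (by exact_mod_cast hne) le_rfl
    have hrem : toRem (buildTree candidates 0 (candidates.length : Int)) = candidates := by
      rw [hr]; simp
    have h := loop_eq num_choices.toNat num_choices (by omega) [] fact
      (buildTree candidates 0 (candidates.length : Int)) hw (by rw [hrem]; exact hpre)
    rw [hrem] at h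
    exact h
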